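-- pv_equiv track=rewrite | github.com/Emarin19/TallerProgramacion_Proyecto_3 | prueba.py | nombres_aux
-- ===== SOURCE A (Python) =====
-- Num = {"a":"1","b":"2","c":"3","d":"4","e":"5","f":"6","g":"7","h":"8","i":"9","j":"0"}
--
-- def nombres_aux(String,i,n,Cont):
--     for key in Num:
--         a = String[i]
--         b = Num[key]
--         if a != b:
--             pass
--         else:
--             return Cont+n
--     i += 1
--     Cont += 1
--     return nombres_aux(String,i,n,Cont)
-- ===== SOURCE B (Python) =====
-- def nombres_aux(String, i, n, Cont):
--     while String[i] not in "0123456789":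
--         i += 1
--         Cont += 1
--     return Cont + n
-- ===== Notes on version B (the rewrite author's own statement) =====
-- stated objective: simpler
-- what changed: B replaces A's tail recursion with a while loop and collapses A's ten-iteration loop over the dict values into a single membership test against "0123456789".
import Mathlib
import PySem

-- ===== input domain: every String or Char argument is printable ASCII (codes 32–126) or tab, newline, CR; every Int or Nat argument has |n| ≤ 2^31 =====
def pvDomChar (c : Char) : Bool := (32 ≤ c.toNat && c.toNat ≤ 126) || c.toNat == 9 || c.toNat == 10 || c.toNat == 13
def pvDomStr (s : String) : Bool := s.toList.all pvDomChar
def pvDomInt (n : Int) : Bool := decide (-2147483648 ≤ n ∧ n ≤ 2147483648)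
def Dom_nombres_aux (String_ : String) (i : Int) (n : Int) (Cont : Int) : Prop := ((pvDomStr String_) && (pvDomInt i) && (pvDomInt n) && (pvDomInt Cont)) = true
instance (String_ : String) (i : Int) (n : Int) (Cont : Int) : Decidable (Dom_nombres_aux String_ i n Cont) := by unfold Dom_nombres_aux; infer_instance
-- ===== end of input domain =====

-- B replaces A's tail recursion + ten-iteration dict loop with a plain while loop whose
-- condition is a single membership test against "0123456789" (objective: simpler).

-- ===== PORT A =====
-- the module-level dict Num, as an insertion-ordered association list
def numPairs : List (String × String) :=
  [("a","1"),("b","2"),("c","3"),("d","4"),("e","5"),("f","6"),("g","7"),("h","8"),("i","9"),("j","0")]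

-- helper for the port's termination measure: pyGet? = some means the index is in range
theorem pyGet?_some_range {s : String} {i : Int} {a : Char}
    (h : PySem.Str.pyGet? s i = some a) : -(s.toList.length : Int) ≤ i ∧ i < s.toList.length := by
  by_contra hc
  rw [PySem.Str.pyGet?_eq, PySem.Chars.pyGet?_eq_listPyGet?,
    (PySem.List.pyGet?_eq_none_iff _ _).2 (by unfold PySem.Raise.InRange; omega)] at h
  simp at h

-- the 'for key in Num' loop: a = String[i] is loop-invariant, so it is taken as the
-- already-looked-up character 'a'; the loop body compares it with each dict value in order
def nombres_auxLoop (pairs : List (String × String)) (a : Char) (n : Int) (Cont : Int) : Option Int :=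
  match pairs with
  | [] => none                                   -- loop fell through without returning
  | (_key, b) :: rest =>
      if String.ofList [a] ≠ b then nombres_auxLoop rest a n Cont   -- pass
      else some (Cont + n)                        -- return Cont+n

def nombres_aux (String_ : String) (i : Int) (n : Int) (Cont : Int) : Int :=
  match h : PySem.Str.pyGet? String_ i with
  | none => 0                                     -- Python raises IndexError here (outside Pre_)
  | some a =>
    match nombres_auxLoop numPairs a n Cont with
    | some r => r
    | none => nombres_aux String_ (i + 1) n (Cont + 1)
termination_by ((String_.toList.length : Int) - i).toNat
decreasing_by
  have := pyGet?_some_range h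
  omega

-- ===== PORT B =====
def nombres_aux_alt (String_ : String) (i : Int) (n : Int) (Cont : Int) : Int :=
  match h : PySem.Str.pyGet? String_ i with
  | none => 0                                     -- Python raises IndexError here (outside Pre_)
  | some c =>
    if PySem.Str.isIn (String.ofList [c]) "0123456789"
    then Cont + n                                 -- while-condition false: return Cont + n
    else nombres_aux_alt String_ (i + 1) n (Cont + 1)   -- loop body: i += 1; Cont += 1
termination_by ((String_.toList.length : Int) - i).toNat
decreasing_by
  have := pyGet?_some_range h
  omega

-- ===== PRECONDITION & SPEC =====
-- Pre_ excludes exactly the inputs on which Python's String[i] eventually raises IndexError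
-- (index out of range before a digit is found): a nonnegative in-range i needs a digit at or
-- after position i; a negative in-range i wraps and then rescans from 0, so it needs any digit.
def Pre_nombres_aux (String_ : String) (i : Int) (n : Int) (Cont : Int) : Prop :=
  (0 ≤ i ∧ i < String_.toList.length ∧
      (String_.toList.drop i.toNat).any PySem.Chars.isdigit = true) ∨
  (-(String_.toList.length : Int) ≤ i ∧ i < 0 ∧
      String_.toList.any PySem.Chars.isdigit = true)
instance (String_ : String) (i : Int) (n : Int) (Cont : Int) : Decidable (Pre_nombres_aux String_ i n Cont) := by unfold Pre_nombres_aux; infer_instance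
def pvWitness_nombres_aux : String × Int × Int × Int := ("ab3c", 0, 5, 0)
def Spec_nombres_aux (String_ : String) (i : Int) (n : Int) (Cont : Int) (out : Int) : Prop := out = nombres_aux_alt String_ i n Cont
instance (String_ : String) (i : Int) (n : Int) (Cont : Int) (out : Int) : Decidable (Spec_nombres_aux String_ i n Cont out) := by unfold Spec_nombres_aux; infer_instance

-- ===== CLAIM (what is proved, stated in full; the proofs are below) =====
def Claim_equal_nombres_aux : Prop := ∀ (String_ : String) (i : Int) (n : Int) (Cont : Int), Dom_nombres_aux String_ i n Cont → Pre_nombres_aux String_ i n Cont → Spec_nombres_aux String_ i n Cont (nombres_aux String_ i n Cont)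

-- ===== LEMMAS AND PROOFS =====

-- B's membership test, for an arbitrary character
theorem isIn_digits (a : Char) :
    PySem.Str.isIn (String.ofList [a]) "0123456789" =
      ['0','1','2','3','4','5','6','7','8','9'].contains a := by
  by_cases h : a ∈ ['0','1','2','3','4','5','6','7','8','9']
  · have ht : PySem.Str.isIn (String.ofList [a]) "0123456789" = true := by
      rw [PySem.Str.isIn_iff_infix]
      simpa using (List.singleton_infix_iff a "0123456789".toList).2 (by simpa using h)
    rw [ht]; simp [h]
  · have hf : PySem.Str.isIn (String.ofList [a]) "0123456789" = false := by
      rw [Bool.eq_false_iff]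
      intro hc
      rw [PySem.Str.isIn_iff_infix] at hc
      exact h (by simpa using (List.singleton_infix_iff a "0123456789".toList).1 (by simpa using hc))
    rw [hf]; simp [h]

-- A's ten-iteration loop over Num agrees with one membership test against the digits
theorem loop_eq_membership (a : Char) (n Cont : Int) :
    nombres_auxLoop numPairs a n Cont =
      (if ['0','1','2','3','4','5','6','7','8','9'].contains a then some (Cont + n) else none) := by
  simp only [numPairs, nombres_auxLoop]
  simp [String.ext_iff, List.contains_eq_mem]
  by_cases h1 : a = '1' <;> by_cases h2 : a = '2' <;> by_cases h3 : a = '3' <;>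
    by_cases h4 : a = '4' <;> by_cases h5 : a = '5' <;> simp_all <;>
  (by_cases h6 : a = '6' <;> by_cases h7 : a = '7' <;> by_cases h8 : a = '8' <;>
    by_cases h9 : a = '9' <;> by_cases h0 : a = '0' <;> simp_all)

theorem nombres_aux_eq_alt (String_ : String) (i : Int) (n : Int) (Cont : Int) :
    nombres_aux String_ i n Cont = nombres_aux_alt String_ i n Cont := by
  fun_induction nombres_aux String_ i n Cont with
  | case1 i Cont h =>
      simp at h
      rw [nombres_aux_alt]
      split
      · rfl
      · next c heq => simp at heq; rw [h] at heq; simp at heq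
  | case2 i Cont a h r hr =>
      simp at h
      rw [nombres_aux_alt]
      rw [loop_eq_membership] at hr
      split
      · next heq => simp at heq; rw [h] at heq; simp at heq
      · next c heq =>
          simp at heq
          rw [h] at heq
          injection heq with hac
          subst hac
          rw [isIn_digits]
          split_ifs with hd
          · simp [hd] at hr; omega
          · exfalso; simp [hd] at hr; simp [List.contains_eq_mem] at hd; tauto
  | case3 i Cont a h hr ih =>
      simp at h
      rw [nombres_aux_alt]
      rw [loop_eq_membership] at hr
      split
      · next heq => simp at heq; rw [h] at heq; simp at heq
      · next c heq =>
          simp at heq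
          rw [h] at heq
          injection heq with hac
          subst hac
          rw [isIn_digits]
          split_ifs with hd
          · exfalso; simp [hd] at hr; simp [List.contains_eq_mem] at hd; tauto
          · exact ih

-- ===== VERDICT (by name: the statement is the Claim_ definition above) =====
theorem nombres_aux_spec : Claim_equal_nombres_aux := by
  intro String_ i n Cont _ _
  unfold Spec_nombres_aux
  exact nombres_aux_eq_alt String_ i n Cont
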